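-- pv_equiv track=rewrite | github.com/RobertGleim/SGCGartglass | import_mysql_dump_to_postgres.py | split_tuples
-- ===== SOURCE A (Python) =====
-- from typing import List
--
-- def split_tuples(values_block: str) -> List[str]:
--     tuples = []
--     depth = 0
--     in_string = False
--     escape = False
--     start = None
--     for i, ch in enumerate(values_block):
--         if in_string:
--             if escape:
--                 escape = False
--             elif ch == "\\":
--                 escape = True
--             elif ch == "'":
--                 in_string = False
--             continue
--
--         if ch == "'":
--             in_string = True
--         elif ch == "(":
--             if depth == 0:
--                 start = i + 1
--             depth += 1
--         elif ch == ")":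
--             depth -= 1
--             if depth == 0 and start is not None:
--                 tuples.append(values_block[start:i])
--                 start = None
--
--     return tuples
-- ===== SOURCE B (Python) =====
-- from typing import List
--
-- def split_tuples(values_block: str) -> List[str]:
--     # Stage 1 (tokenize): collect the positions of all '(' / ')' that lie
--     # outside single-quoted strings, jumping over quoted regions.
--     n = len(values_block)
--     events = []
--     i = 0
--     while i < n:
--         ch = values_block[i]
--         if ch == "'":
--             i += 1
--             while i < n:
--                 c = values_block[i]
--                 i += 2 if c == "\\" else 1
--                 if c == "'":
--                     break
--         else:
--             if ch in "()":
--                 events.append((i, ch))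
--             i += 1
--     # Stage 2 (parse): pair top-level parens over the small event list only.
--     tuples = []
--     depth = 0
--     start = None
--     for i, ch in events:
--         if ch == "(":
--             if depth == 0:
--                 start = i + 1
--             depth += 1
--         else:
--             depth -= 1
--             if depth == 0 and start is not None:
--                 tuples.append(values_block[start:i])
--                 start = None
--     return tuples
-- ===== Notes on version B (the rewrite author's own statement) =====
-- stated objective: alternative
-- what changed: Replaced A's fused single scan with five state variables by a two-stage tokenize-then-parse pipeline: stage 1 extracts the positions of parentheses outside quoted strings (jumping over quoted regions), stage 2 pairs top-level parens by folding over that small event list only.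
import Mathlib
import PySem

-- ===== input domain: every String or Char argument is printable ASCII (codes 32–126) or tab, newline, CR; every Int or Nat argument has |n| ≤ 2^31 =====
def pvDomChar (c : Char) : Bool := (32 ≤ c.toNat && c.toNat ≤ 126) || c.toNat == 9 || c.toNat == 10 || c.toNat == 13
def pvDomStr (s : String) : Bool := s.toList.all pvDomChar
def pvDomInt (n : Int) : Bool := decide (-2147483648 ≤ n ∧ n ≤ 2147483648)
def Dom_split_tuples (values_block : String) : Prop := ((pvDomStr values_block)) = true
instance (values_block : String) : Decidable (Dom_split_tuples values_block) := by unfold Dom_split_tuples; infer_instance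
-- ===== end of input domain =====

-- B replaces A's fused single scan (depth/in_string/escape/start flags) by a two-stage
-- tokenize-then-parse pipeline: extract paren events outside strings, then fold over them.

-- ===== PORT A =====
-- state: (tuples, depth, in_string, escape, start)
def stepA (cs : List Char) (s : List String × Int × Bool × Bool × Option Int)
    (p : Int × Char) : List String × Int × Bool × Bool × Option Int :=
  let (tuples, depth, in_string, escape, start) := s
  let (i, ch) := p
  if in_string then
    if escape then (tuples, depth, in_string, false, start)
    else if ch = '\\' then (tuples, depth, in_string, true, start)
    else if ch = '\'' then (tuples, depth, false, escape, start)
    else s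
  else if ch = '\'' then (tuples, depth, true, escape, start)
  else if ch = '(' then
    (tuples, depth + 1, in_string, escape, if depth = 0 then some (i + 1) else start)
  else if ch = ')' then
    let depth' := depth - 1
    if depth' = 0 ∧ start ≠ none then
      match start with
      | some st =>
          (tuples ++ [String.ofList (PySem.List.slice cs (some st) (some i))],
           depth', in_string, escape, none)
      | none => (tuples, depth', in_string, escape, start)
    else (tuples, depth', in_string, escape, start)
  else s

def split_tuples (values_block : String) : List String :=
  ((PySem.List.enumerate values_block.toList 0).foldl (stepA values_block.toList)
    ([], 0, false, false, none)).1

-- ===== PORT B =====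
-- stage-1 inner while loop: advance past the closing quote of a string
-- (Python's `i += 2 if c == "\\" else 1; if c == "'": break` is rendered as
--  returning i+1 directly on the quote)
def skipStr (cs : List Char) (i : Nat) : Nat :=
  if h : i < cs.length then
    if cs[i] = '\\' then skipStr cs (i + 2)
    else if cs[i] = '\'' then i + 1
    else skipStr cs (i + 1)
  else i
termination_by cs.length - i

theorem le_skipStr (cs : List Char) (i : Nat) : i ≤ skipStr cs i := by
  unfold skipStr
  split
  · split
    · exact le_trans (by omega) (le_skipStr cs (i + 2))
    · split
      · omega
      · exact le_trans (by omega) (le_skipStr cs (i + 1))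
  · exact le_refl i
termination_by cs.length - i

-- stage 1: the list of (index, char) for parens outside quoted strings
def parenEvents (cs : List Char) (i : Nat) : List (Nat × Char) :=
  if h : i < cs.length then
    let ch := cs[i]
    if ch = '\'' then parenEvents cs (skipStr cs (i + 1))
    else if ch = '(' ∨ ch = ')' then (i, ch) :: parenEvents cs (i + 1)
    else parenEvents cs (i + 1)
  else []
termination_by cs.length - i
decreasing_by
  · have := le_skipStr cs (i + 1); omega
  all_goals omega

-- stage 2: fold over the event list; state (tuples, depth, start)
def stepB (cs : List Char) (s : List String × Int × Option Int)
    (p : Nat × Char) : List String × Int × Option Int :=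
  let (tuples, depth, start) := s
  let (i, ch) := p
  if ch = '(' then
    (tuples, depth + 1, if depth = 0 then some ((i : Int) + 1) else start)
  else
    let depth' := depth - 1
    if depth' = 0 then
      match start with
      | some st =>
          (tuples ++ [String.ofList (PySem.List.slice cs (some st) (some (i : Int)))],
           depth', none)
      | none => (tuples, depth', start)
    else (tuples, depth', start)

def split_tuples_alt (values_block : String) : List String :=
  ((parenEvents values_block.toList 0).foldl (stepB values_block.toList)
    ([], 0, none)).1

-- ===== PRECONDITION & SPEC =====
def Spec_split_tuples (values_block : String) (out : List String) : Prop := out = split_tuples_alt values_block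
instance (values_block : String) (out : List String) : Decidable (Spec_split_tuples values_block out) := by unfold Spec_split_tuples; infer_instance

-- ===== CLAIM (what is proved, stated in full; the proofs are below) =====
def Claim_equal_split_tuples : Prop := ∀ (values_block : String), Dom_split_tuples values_block → Spec_split_tuples values_block (split_tuples values_block)

-- ===== LEMMAS AND PROOFS =====

-- string mode of A's fold corresponds to B's skipStr scan (result state preserved)
theorem strMode (cs : List Char) (k : Nat) :
    ∀ (j : Nat) (tuples : List String) (depth : Int) (start : Option Int),
      cs.length - j ≤ k →
      ((PySem.List.enumerate (cs.drop j) (j : Int)).foldl (stepA cs)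
          (tuples, depth, true, false, start)).1 =
      ((PySem.List.enumerate (cs.drop (skipStr cs j)) ((skipStr cs j : Nat) : Int)).foldl (stepA cs)
          (tuples, depth, false, false, start)).1 := by
  induction k with
  | zero =>
      intro j tuples depth start hk
      have hj : cs.length ≤ j := by omega
      rw [List.drop_eq_nil_of_le hj, skipStr]
      rw [dif_neg (by omega), List.drop_eq_nil_of_le hj]
      simp [PySem.List.enumerate]
  | succ k ih =>
      intro j tuples depth start hk
      by_cases h : j < cs.length
      · rw [List.drop_eq_getElem_cons h, PySem.List.enumerate_cons, List.foldl_cons]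
        rw [skipStr, dif_pos h]
        by_cases hb : cs[j] = '\\'
        · rw [if_pos hb]
          have step1 : stepA cs (tuples, depth, true, false, start) ((j : Int), cs[j])
              = (tuples, depth, true, true, start) := by
            simp [stepA, hb]
          rw [step1]
          by_cases h2 : j + 1 < cs.length
          · rw [List.drop_eq_getElem_cons h2, PySem.List.enumerate_cons, List.foldl_cons]
            have step2 : stepA cs (tuples, depth, true, true, start)
                ((j : Int) + 1, cs[j+1]) = (tuples, depth, true, false, start) := by
              simp [stepA]
            rw [step2]
            have := ih (j + 2) tuples depth start (by omega)
            have hc : ((j : Int) + 1 + 1) = ((j + 2 : Nat) : Int) := by push_cast; ring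
            rw [hc]
            exact this
          · have hle : cs.length ≤ j + 1 := by omega
            rw [List.drop_eq_nil_of_le hle, skipStr, dif_neg (by omega),
              List.drop_eq_nil_of_le (le_trans hle (by omega))]
            simp [PySem.List.enumerate]
        · rw [if_neg hb]
          by_cases hq : cs[j] = '\''
          · rw [if_pos hq]
            have step1 : stepA cs (tuples, depth, true, false, start) ((j : Int), cs[j])
                = (tuples, depth, false, false, start) := by
              simp [stepA, hb, hq]
            rw [step1]
            have hc : ((j : Int) + 1) = ((j + 1 : Nat) : Int) := by push_cast; ring
            rw [hc]
          · rw [if_neg hq]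
            have step1 : stepA cs (tuples, depth, true, false, start) ((j : Int), cs[j])
                = (tuples, depth, true, false, start) := by
              simp [stepA, hb, hq]
            rw [step1]
            have := ih (j + 1) tuples depth start (by omega)
            have hc : ((j : Int) + 1) = ((j + 1 : Nat) : Int) := by push_cast; ring
            rw [hc]
            exact this
      · have hj : cs.length ≤ j := by omega
        rw [List.drop_eq_nil_of_le hj, skipStr]
        rw [dif_neg (by omega), List.drop_eq_nil_of_le hj]
        simp [PySem.List.enumerate]

-- main correspondence: A's fold from index i equals B's stage-2 fold over the
-- events extracted from index i, for any shared state
theorem mainLoop (cs : List Char) (k : Nat) :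
    ∀ (i : Nat) (tuples : List String) (depth : Int) (start : Option Int),
      cs.length - i ≤ k →
      ((PySem.List.enumerate (cs.drop i) (i : Int)).foldl (stepA cs)
          (tuples, depth, false, false, start)).1 =
      ((parenEvents cs i).foldl (stepB cs) (tuples, depth, start)).1 := by
  induction k with
  | zero =>
      intro i tuples depth start hk
      have hi : cs.length ≤ i := by omega
      rw [List.drop_eq_nil_of_le hi, parenEvents, dif_neg (by omega)]
      simp [PySem.List.enumerate]
  | succ k ih =>
      intro i tuples depth start hk
      by_cases h : i < cs.length
      · rw [List.drop_eq_getElem_cons h, PySem.List.enumerate_cons, List.foldl_cons,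
          parenEvents, dif_pos h]
        by_cases hq : cs[i] = '\''
        · rw [if_pos hq]
          have step1 : stepA cs (tuples, depth, false, false, start) ((i : Int), cs[i])
              = (tuples, depth, true, false, start) := by
            simp [stepA, hq]
          rw [step1]
          have hc : ((i : Int) + 1) = ((i + 1 : Nat) : Int) := by push_cast; ring
          rw [hc]
          have hs := strMode cs (cs.length) (i + 1) tuples depth start (by omega)
          rw [hs]
          exact ih (skipStr cs (i + 1)) tuples depth start
            (by have := le_skipStr cs (i + 1); omega)
        · rw [if_neg hq]
          by_cases ho : cs[i] = '('
          · rw [if_pos (show cs[i] = '(' ∨ cs[i] = ')' from Or.inl ho), List.foldl_cons]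
            have step1 : stepA cs (tuples, depth, false, false, start) ((i : Int), cs[i])
                = (tuples, depth + 1, false, false,
                    if depth = 0 then some ((i : Int) + 1) else start) := by
              simp [stepA, hq, ho]
            have step2 : stepB cs (tuples, depth, start) (i, cs[i])
                = (tuples, depth + 1, if depth = 0 then some ((i : Int) + 1) else start) := by
              simp [stepB, ho]
            rw [step1, step2]
            have hc : ((i : Int) + 1) = ((i + 1 : Nat) : Int) := by push_cast; ring
            rw [hc]
            exact ih (i + 1) tuples (depth + 1) _ (by omega)
          · by_cases hcl : cs[i] = ')'
            · rw [if_pos (show cs[i] = '(' ∨ cs[i] = ')' from Or.inr hcl), List.foldl_cons]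
              have hc : ((i : Int) + 1) = ((i + 1 : Nat) : Int) := by push_cast; ring
              by_cases hd : depth - 1 = 0
              · cases start with
                | none =>
                    have step1 : stepA cs (tuples, depth, false, false, none)
                        ((i : Int), cs[i]) = (tuples, depth - 1, false, false, none) := by
                      simp [stepA, hq, ho, hcl]
                    have step2 : stepB cs (tuples, depth, none) (i, cs[i])
                        = (tuples, depth - 1, none) := by
                      simp [stepB, ho, hcl, hd]
                    rw [step1, step2, hc]
                    exact ih (i + 1) tuples (depth - 1) none (by omega)
                | some st =>
                    have step1 : stepA cs (tuples, depth, false, false, some st)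
                        ((i : Int), cs[i]) =
                        (tuples ++ [String.ofList (PySem.List.slice cs (some st) (some (i : Int)))],
                         depth - 1, false, false, none) := by
                      simp [stepA, hq, ho, hcl, hd]
                    have step2 : stepB cs (tuples, depth, some st) (i, cs[i])
                        = (tuples ++ [String.ofList (PySem.List.slice cs (some st) (some (i : Int)))],
                           depth - 1, none) := by
                      simp [stepB, ho, hcl, hd]
                    rw [step1, step2, hc]
                    exact ih (i + 1) _ (depth - 1) none (by omega)
              · have step1 : stepA cs (tuples, depth, false, false, start)
                    ((i : Int), cs[i]) = (tuples, depth - 1, false, false, start) := by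
                  cases start with
                  | none => simp [stepA, hq, ho, hcl]
                  | some st => simp [stepA, hq, ho, hcl, hd]
                have step2 : stepB cs (tuples, depth, start) (i, cs[i])
                    = (tuples, depth - 1, start) := by
                  simp [stepB, ho, hcl, hd]
                rw [step1, step2, hc]
                exact ih (i + 1) tuples (depth - 1) start (by omega)
            · rw [if_neg (show ¬(cs[i] = '(' ∨ cs[i] = ')') by tauto)]
              have step1 : stepA cs (tuples, depth, false, false, start)
                  ((i : Int), cs[i]) = (tuples, depth, false, false, start) := by
                simp [stepA, hq, ho, hcl]
              have hc : ((i : Int) + 1) = ((i + 1 : Nat) : Int) := by push_cast; ring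
              rw [step1, hc]
              exact ih (i + 1) tuples depth start (by omega)
      · have hi : cs.length ≤ i := by omega
        rw [List.drop_eq_nil_of_le hi, parenEvents, dif_neg (by omega)]
        simp [PySem.List.enumerate]

-- ===== VERDICT (by name: the statement is the Claim_ definition above) =====
theorem split_tuples_spec : Claim_equal_split_tuples := by
  intro v _
  unfold Spec_split_tuples split_tuples split_tuples_alt
  have := mainLoop v.toList v.toList.length 0 [] 0 none (by omega)
  simpa using this
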